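-- pv_equiv track=rewrite | github.com/jdavancens/heave-sway-surge | dissertation/tools/rhythmtools/EvenSubdivider.py | _binary_to_ratio
-- ===== SOURCE A (Python) =====
-- def _binary_to_ratio(pattern):
--     indices = []
--     for i,x in enumerate(pattern):
--         if x == 1:
--             indices.append(i)
--     ratio = []
--     if indices[0] != 0:
--         ratio.append(0 - indices[0])
--     for i in range(1, len(indices)):
--         ratio.append(indices[i] - indices[i-1])
--     ratio.append(len(pattern) - indices[-1])
--     return ratio
-- ===== SOURCE B (Python) =====
-- def _binary_to_ratio(pattern):
--     ratio = []
--     prev = None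
--     for i, x in enumerate(pattern):
--         if x == 1:
--             if prev is None:
--                 if i != 0:
--                     ratio.append(0 - i)
--             else:
--                 ratio.append(i - prev)
--             prev = i
--     ratio.append(len(pattern) - prev)
--     return ratio
-- ===== Notes on version B (the rewrite author's own statement) =====
-- stated objective: alternative
-- what changed: B makes one pass keeping only the index of the previous 1 and emits each gap on the fly, instead of materializing the full list of 1-indices and then re-indexing it with a second range loop; Pre_ excludes patterns containing no 1, on which both implementations raise.
import Mathlib
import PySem

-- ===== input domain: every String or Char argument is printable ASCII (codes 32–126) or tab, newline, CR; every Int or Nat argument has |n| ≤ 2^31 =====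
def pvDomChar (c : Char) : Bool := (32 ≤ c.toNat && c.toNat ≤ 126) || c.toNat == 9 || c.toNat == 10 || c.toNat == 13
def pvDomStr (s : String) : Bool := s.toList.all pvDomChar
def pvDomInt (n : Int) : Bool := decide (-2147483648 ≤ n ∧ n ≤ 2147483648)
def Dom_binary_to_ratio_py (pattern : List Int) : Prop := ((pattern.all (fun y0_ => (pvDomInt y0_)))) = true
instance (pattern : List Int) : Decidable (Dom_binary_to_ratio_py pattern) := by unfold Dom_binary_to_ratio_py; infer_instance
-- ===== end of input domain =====

-- B replaces A's two-pass build (collect all 1-indices, then re-index that list with a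
-- second range loop) by a single pass keeping only the index of the previously seen 1;
-- equivalence is claimed on patterns containing a 1 (elsewhere both Pythons raise).

-- ===== PORT A =====
def binary_to_ratio_py (pattern : List Int) : List Int :=
  let indices : List Int :=
    (PySem.List.enumerate pattern 0).foldl
      (fun (acc : List Int) (p : Int × Int) => if p.2 == 1 then acc ++ [p.1] else acc) []
  match indices with
  | [] => []          -- Python raises IndexError at indices[0]; excluded by Pre_
  | i0 :: _ =>
    let ratio : List Int := if i0 != 0 then [0 - i0] else []
    let ratio := (PySem.List.pyRange 1 (PySem.List.len indices) 1).foldl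
      (fun (r : List Int) (i : Int) =>
        r ++ [PySem.List.pyGetD indices i 0 - PySem.List.pyGetD indices (i - 1) 0]) ratio
    ratio ++ [PySem.List.len pattern - PySem.List.pyGetD indices (-1) 0]

-- ===== PORT B =====
-- loop body of B's single pass: state = (ratio so far, index of the previous 1)
def pvStepB (st : List Int × Option Int) (q : Int × Int) : List Int × Option Int :=
  if q.2 == 1 then
    match st.2 with
    | none => ((if q.1 != 0 then st.1 ++ [0 - q.1] else st.1), some q.1)
    | some prev => (st.1 ++ [q.1 - prev], some q.1)
  else st

def binary_to_ratio_py_alt (pattern : List Int) : List Int :=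
  let st := (PySem.List.enumerate pattern 0).foldl pvStepB ([], none)
  match st.2 with
  | none => []        -- Python raises TypeError at len(pattern) - None; excluded by Pre_
  | some prev => st.1 ++ [PySem.List.len pattern - prev]

-- ===== PRECONDITION & SPEC =====
-- Pre_: both Pythons raise exactly when the pattern contains no 1.
def Pre_binary_to_ratio_py (pattern : List Int) : Prop := (1 : Int) ∈ pattern
instance (pattern : List Int) : Decidable (Pre_binary_to_ratio_py pattern) := by
  unfold Pre_binary_to_ratio_py; infer_instance

def pvWitness_binary_to_ratio_py : List Int := [0, 1, 0, 0, 1]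

def Spec_binary_to_ratio_py (pattern : List Int) (out : List Int) : Prop := out = binary_to_ratio_py_alt pattern
instance (pattern : List Int) (out : List Int) : Decidable (Spec_binary_to_ratio_py pattern out) := by unfold Spec_binary_to_ratio_py; infer_instance

-- ===== CLAIM (what is proved, stated in full; the proofs are below) =====
def Claim_equal_binary_to_ratio_py : Prop := ∀ (pattern : List Int), Dom_binary_to_ratio_py pattern → Pre_binary_to_ratio_py pattern → Spec_binary_to_ratio_py pattern (binary_to_ratio_py pattern)

-- ===== LEMMAS AND PROOFS =====

-- positions (0-based, offset s) of the 1s of a pattern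
def pvOnes (xs : List Int) (s : Int) : List Int :=
  match xs with
  | [] => []
  | x :: t => (if x == 1 then [s] else []) ++ pvOnes t (s + 1)

-- successive gaps starting from p
def pvChain (p : Int) (l : List Int) : List Int :=
  match l with
  | [] => []
  | i :: t => (i - p) :: pvChain i t

lemma pvOnes_eq_nil_iff (xs : List Int) (s : Int) : pvOnes xs s = [] ↔ (1 : Int) ∉ xs := by
  induction xs generalizing s with
  | nil => simp [pvOnes]
  | cons x t ih =>
    by_cases hx : x = 1
    · simp [pvOnes, hx]
    · simp only [pvOnes, List.mem_cons]
      simp [hx, ih]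
      exact fun _ h => hx h.symm

-- A's first loop builds exactly pvOnes pattern 0
lemma filter_enumerate_eq_pvOnes (xs : List Int) (s : Int) :
    ((PySem.List.enumerate xs s).filter (fun (p : Int × Int) => p.2 == 1)).map (·.1)
      = pvOnes xs s := by
  induction xs generalizing s with
  | nil => simp [PySem.List.enumerate_nil, pvOnes]
  | cons x t ih =>
    rw [PySem.List.enumerate_cons]
    by_cases hx : x = 1 <;> simp [hx, pvOnes, ih]

lemma pyGetD_cons_succ (a : Int) (l : List Int) (k : Int) (hk : 0 ≤ k) :
    PySem.List.pyGetD (a :: l) (k + 1) 0 = PySem.List.pyGetD l k 0 := by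
  rw [PySem.List.pyGetD_of_nonneg _ _ (by omega), PySem.List.pyGetD_of_nonneg _ _ hk]
  have : (k + 1).toNat = k.toNat + 1 := by omega
  simp [this]

-- A's range loop computes the successive gaps of the index list
lemma range_fold_eq_pvChain (i0 : Int) (t : List Int) (init : List Int) :
    (PySem.List.pyRange 1 (PySem.List.len (i0 :: t)) 1).foldl
      (fun (r : List Int) (i : Int) =>
        r ++ [PySem.List.pyGetD (i0 :: t) i 0 - PySem.List.pyGetD (i0 :: t) (i - 1) 0]) init
    = init ++ pvChain i0 t := by
  rw [PySem.List.foldl_append_singleton_eq_map]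
  congr 1
  induction t generalizing i0 init with
  | nil => simp [PySem.List.pyRange_one_eq_nil, PySem.List.len, pvChain]
  | cons b t ih =>
    have hlen : PySem.List.len (i0 :: b :: t) = (t.length : Int) + 2 := by
      simp [PySem.List.len]; omega
    rw [hlen, PySem.List.pyRange_one_cons (by omega)]
    simp only [List.map_cons]
    rw [show (1 : Int) + 1 = 2 from by norm_num]
    have hhead : PySem.List.pyGetD (i0 :: b :: t) 1 0 - PySem.List.pyGetD (i0 :: b :: t) (1 - 1) 0
        = b - i0 := by
      rw [show (1 : Int) - 1 = 0 by ring,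
        PySem.List.pyGetD_of_nonneg _ _ (by norm_num),
        PySem.List.pyGetD_of_nonneg _ _ (by norm_num)]
      simp
    rw [hhead]
    have hshift : (PySem.List.pyRange 2 ((t.length : Int) + 2) 1).map
        (fun i => PySem.List.pyGetD (i0 :: b :: t) i 0 - PySem.List.pyGetD (i0 :: b :: t) (i - 1) 0)
        = (PySem.List.pyRange 1 ((t.length : Int) + 1) 1).map
        (fun i => PySem.List.pyGetD (b :: t) i 0 - PySem.List.pyGetD (b :: t) (i - 1) 0) := by
      rw [PySem.List.pyRange_one, PySem.List.pyRange_one]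
      have : ((t.length : Int) + 2 - 2).toNat = ((t.length : Int) + 1 - 1).toNat := by omega
      rw [this, List.map_map, List.map_map]
      apply List.map_congr_left
      intro k hk
      simp only [Function.comp_apply]
      have h2k : (2 : Int) + (k : Int) = ((1 : Int) + k) + 1 := by ring
      have h1k : (2 : Int) + (k : Int) - 1 = ((1 : Int) + k - 1) + 1 := by ring
      rw [h1k, pyGetD_cons_succ _ _ _ (by omega), h2k,
        pyGetD_cons_succ _ _ _ (by positivity)]
    rw [hshift]
    have hrec := ih (i0 := b) (init := [])
    simp only [PySem.List.len, List.length_cons] at hrec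
    have harg : ((t.length : Int) + 1) = ((t.length + 1 : Nat) : Int) := by push_cast; ring
    rw [pvChain, harg]
    exact congrArg (List.cons (b - i0)) hrec

-- Python's l[-1] is the last element of a nonempty l
lemma pyGetD_neg_one (l : List Int) (h : l ≠ []) :
    PySem.List.pyGetD l (-1) 0 = l.getLastD 0 := by
  have hn : 1 ≤ l.length := List.length_pos_iff.mpr h
  unfold PySem.List.pyGetD PySem.List.pyGet? PySem.List.pyIdx?
  rw [if_neg (by omega), if_pos (by omega)]
  simp [List.getLastD_eq_getLast?, List.getLast?_eq_getElem?]

-- B's loop once the previous 1 is known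
lemma b_fold_some (xs : List Int) (s : Int) (ratio : List Int) (p : Int) :
    (PySem.List.enumerate xs s).foldl pvStepB (ratio, some p)
    = (ratio ++ pvChain p (pvOnes xs s), some ((pvOnes xs s).getLastD p)) := by
  induction xs generalizing s ratio p with
  | nil => simp [PySem.List.enumerate_nil, pvOnes, pvChain]
  | cons x t ih =>
    rw [PySem.List.enumerate_cons, List.foldl_cons]
    by_cases hx : x = 1
    · have hstep : pvStepB (ratio, some p) (s, x) = (ratio ++ [s - p], some s) := by
        simp [pvStepB, hx]
      rw [hstep, ih]
      have hO : pvOnes (x :: t) s = s :: pvOnes t (s + 1) := by simp [pvOnes, hx]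
      rw [hO]
      simp only [pvChain, List.getLastD_cons]
      simp [List.append_assoc]

    · have hstep : pvStepB (ratio, some p) (s, x) = (ratio, some p) := by
        simp [pvStepB, hx]
      rw [hstep, ih]
      simp [pvOnes, hx]

-- B's loop before any 1 is seen
lemma b_fold_none (xs : List Int) (s : Int) (ratio : List Int) :
    (PySem.List.enumerate xs s).foldl pvStepB (ratio, none)
    = match pvOnes xs s with
      | [] => (ratio, none)
      | i0 :: rest => (ratio ++ (if i0 != 0 then [0 - i0] else []) ++ pvChain i0 rest,
          some (rest.getLastD i0)) := by
  induction xs generalizing s ratio with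
  | nil => simp [PySem.List.enumerate_nil, pvOnes]
  | cons x t ih =>
    rw [PySem.List.enumerate_cons, List.foldl_cons]
    by_cases hx : x = 1
    · have hstep : pvStepB (ratio, none) (s, x)
          = ((if s != 0 then ratio ++ [0 - s] else ratio), some s) := by
        simp only [pvStepB, hx]
        rw [if_pos (by rfl : ((1 : Int) == 1) = true)]
      rw [hstep, b_fold_some]
      simp only [pvOnes, hx]
      have : (if s != 0 then ratio ++ [0 - s] else ratio)
          = ratio ++ (if s != 0 then [0 - s] else []) := by
        split <;> simp
      rw [this]
      simp [List.append_assoc]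
    · have hstep : pvStepB (ratio, none) (s, x) = (ratio, none) := by
        simp [pvStepB, hx]
      rw [hstep, ih]
      simp [pvOnes, hx]

-- ===== VERDICT (by name: the statement is the Claim_ definition above) =====
theorem binary_to_ratio_py_spec : Claim_equal_binary_to_ratio_py := by
  intro pattern _hdom hpre
  unfold Spec_binary_to_ratio_py
  show binary_to_ratio_py pattern = binary_to_ratio_py_alt pattern
  have hne : pvOnes pattern 0 ≠ [] := by
    rw [Ne, pvOnes_eq_nil_iff]; exact fun h => h hpre
  obtain ⟨i0, t, hOnes⟩ : ∃ i0 t, pvOnes pattern 0 = i0 :: t := by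
    cases h : pvOnes pattern 0 with
    | nil => exact absurd h hne
    | cons a b => exact ⟨a, b, rfl⟩
  have hA : (PySem.List.enumerate pattern 0).foldl
      (fun (acc : List Int) (p : Int × Int) => if p.2 == 1 then acc ++ [p.1] else acc) []
      = i0 :: t := by
    rw [PySem.List.foldl_append_if, List.nil_append, filter_enumerate_eq_pvOnes, hOnes]
  rw [binary_to_ratio_py, binary_to_ratio_py_alt]
  simp only [hA, b_fold_none, hOnes]
  rw [range_fold_eq_pvChain, pyGetD_neg_one _ (by simp)]
  simp [List.append_assoc]
  rw [← List.getLastD_eq_getLast?, ← List.getLastD_eq_getLast?, List.getLastD_cons]
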